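-- pv_equiv track=rewrite | github.com/Delfiiina/python | clasesLabos/Practica-Parcial/PracticaClase24.py | cuanto_saco
-- ===== SOURCE A (Python) =====
-- def cuanto_saco (persona_estrategia : tuple[str,str], estrategias: list[tuple[str,str]]) -> int:
--     puntos : int = 0
--
--     for tupla in estrategias:
--         if tupla != persona_estrategia:
--             if persona_estrategia[1] == tupla [1]:
--                 if persona_estrategia[1] == "me desvio siempre":
--                     puntos -= 10
--                 else:
--                     puntos -= 5
--             else:
--                 if persona_estrategia[1] == "me desvio siempre":
--                     puntos -= 15
--                 else:
--                     puntos +=10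
--     return puntos
-- ===== SOURCE B (Python) =====
-- def cuanto_saco(persona_estrategia, estrategias):
--     # count-then-arithmetic: one rule choice hoisted out, then closed form over counts
--     if persona_estrategia[1] == "me desvio siempre":
--         match_value, diff_value = -10, -15
--     else:
--         match_value, diff_value = -5, 10
--     total = len(estrategias)
--     same_strat = sum(1 for t in estrategias if t[1] == persona_estrategia[1])
--     same_full = estrategias.count(persona_estrategia)
--     return (same_strat - same_full) * match_value + (total - same_strat) * diff_value
-- ===== Notes on version B (the rewrite author's own statement) =====
-- stated objective: simpler
-- what changed: Replaces the per-element branching accumulator loop by hoisting the strategy test out to pick a (match,diff) point pair and computing the result in closed form from three counts (length, same-strategy count, exact-duplicate count).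
import Mathlib
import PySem

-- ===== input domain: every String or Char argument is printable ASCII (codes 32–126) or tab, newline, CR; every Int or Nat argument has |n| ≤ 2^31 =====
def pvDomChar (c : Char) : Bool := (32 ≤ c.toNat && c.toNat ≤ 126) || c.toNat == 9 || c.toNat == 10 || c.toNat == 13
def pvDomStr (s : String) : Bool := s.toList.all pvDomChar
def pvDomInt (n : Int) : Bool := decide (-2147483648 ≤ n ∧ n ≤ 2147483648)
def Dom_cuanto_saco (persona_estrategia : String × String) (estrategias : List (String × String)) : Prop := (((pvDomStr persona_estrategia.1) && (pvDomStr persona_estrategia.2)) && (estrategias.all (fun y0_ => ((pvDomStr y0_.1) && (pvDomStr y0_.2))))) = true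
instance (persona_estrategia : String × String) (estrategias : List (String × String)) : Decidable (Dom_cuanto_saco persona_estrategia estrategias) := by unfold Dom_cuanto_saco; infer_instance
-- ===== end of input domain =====

-- B replaces A's per-element branching accumulator with a count-then-arithmetic closed form (simpler decomposition, same O(n) cost).


-- ===== PORT A =====
def cuanto_saco (persona_estrategia : String × String) (estrategias : List (String × String)) : Int :=
  estrategias.foldl (fun puntos tupla =>
    if tupla ≠ persona_estrategia then
      if persona_estrategia.2 = tupla.2 then
        if persona_estrategia.2 = "me desvio siempre" then puntos - 10 else puntos - 5
      else
        if persona_estrategia.2 = "me desvio siempre" then puntos - 15 else puntos + 10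
    else puntos) 0

-- ===== PORT B =====
def cuanto_saco_alt (persona_estrategia : String × String) (estrategias : List (String × String)) : Int :=
  let match_value : Int := if persona_estrategia.2 = "me desvio siempre" then -10 else -5
  let diff_value : Int := if persona_estrategia.2 = "me desvio siempre" then -15 else 10
  let total : Int := estrategias.length
  let same_strat : Int := (estrategias.filter (fun t => t.2 = persona_estrategia.2)).length
  let same_full : Int := PySem.List.count estrategias persona_estrategia
  (same_strat - same_full) * match_value + (total - same_strat) * diff_value

-- ===== PRECONDITION & SPEC =====
def Spec_cuanto_saco (persona_estrategia : String × String) (estrategias : List (String × String)) (out : Int) : Prop := out = cuanto_saco_alt persona_estrategia estrategias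
instance (persona_estrategia : String × String) (estrategias : List (String × String)) (out : Int) : Decidable (Spec_cuanto_saco persona_estrategia estrategias out) := by unfold Spec_cuanto_saco; infer_instance

-- ===== CLAIM (what is proved, stated in full; the proofs are below) =====
def Claim_equal_cuanto_saco : Prop := ∀ (persona_estrategia : String × String) (estrategias : List (String × String)), Dom_cuanto_saco persona_estrategia estrategias → Spec_cuanto_saco persona_estrategia estrategias (cuanto_saco persona_estrategia estrategias)

-- ===== LEMMAS AND PROOFS =====

theorem cuanto_saco_alt_cons (p t : String × String) (es : List (String × String)) :
    cuanto_saco_alt p (t :: es) =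
      (if t ≠ p then
        (if p.2 = t.2 then
          (if p.2 = "me desvio siempre" then (-10 : Int) else -5)
        else
          (if p.2 = "me desvio siempre" then (-15 : Int) else 10))
      else 0) + cuanto_saco_alt p es := by
  simp only [cuanto_saco_alt, PySem.List.count, List.count_cons, List.filter_cons,
    List.length_cons, decide_eq_true_eq, beq_iff_eq]
  split_ifs <;> simp_all <;> ring

theorem cuanto_saco_loop (p : String × String) (es : List (String × String)) (c : Int) :
    es.foldl (fun puntos tupla =>
      if tupla ≠ p then
        if p.2 = tupla.2 then
          if p.2 = "me desvio siempre" then puntos - 10 else puntos - 5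
        else
          if p.2 = "me desvio siempre" then puntos - 15 else puntos + 10
      else puntos) c = c + cuanto_saco_alt p es := by
  induction es generalizing c with
  | nil => simp [cuanto_saco_alt]
  | cons t es ih =>
    rw [List.foldl_cons, ih, cuanto_saco_alt_cons]
    split_ifs <;> ring

-- ===== VERDICT (by name: the statement is the Claim_ definition above) =====
theorem cuanto_saco_spec : Claim_equal_cuanto_saco := by
  intro p es _
  unfold Spec_cuanto_saco cuanto_saco
  rw [cuanto_saco_loop]
  ring
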